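-- pv_equiv track=rewrite | github.com/flext-sh/flext-ldif | src/flext_ldif/_utilities/dn.py | _has_double_unescaped_commas
-- ===== SOURCE A (Python) =====
-- def _has_double_unescaped_commas(dn_str: str) -> bool:
--     """Check for consecutive unescaped commas in DN string."""
--     i = 0
--     while i < len(dn_str) - 1:
--         if (
--             dn_str[i] == ","
--             and dn_str[i + 1] == ","
--             and (i == 0 or dn_str[i - 1] != "\\")
--         ):
--             return True
--         i += 1
--     return False
-- ===== SOURCE B (Python) =====
-- def _has_double_unescaped_commas(dn_str: str) -> bool:
--     """Check for consecutive unescaped commas in DN string."""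
--     return ",," in dn_str.replace("\\,", "\x00")
-- ===== Notes on version B (the rewrite author's own statement) =====
-- stated objective: simpler
-- what changed: Replaces the index loop with a backward escape check by one replace('\,', NUL) pass that consumes escaped commas, followed by a single ',,' substring search.
import Mathlib
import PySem

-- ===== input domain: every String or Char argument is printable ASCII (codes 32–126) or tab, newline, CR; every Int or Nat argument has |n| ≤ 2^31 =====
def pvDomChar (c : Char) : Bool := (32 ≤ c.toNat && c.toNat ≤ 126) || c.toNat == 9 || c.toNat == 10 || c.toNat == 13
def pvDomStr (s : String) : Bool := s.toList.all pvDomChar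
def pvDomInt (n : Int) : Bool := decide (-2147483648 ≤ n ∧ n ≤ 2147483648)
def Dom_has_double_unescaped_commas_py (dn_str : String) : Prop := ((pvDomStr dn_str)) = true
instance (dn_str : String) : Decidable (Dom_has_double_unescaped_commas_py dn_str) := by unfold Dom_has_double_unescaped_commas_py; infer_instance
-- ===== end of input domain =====

-- B replaces A's index loop with a backward escape check by one replace("\\,", NUL) pass followed by a single ",," substring search — simpler.

-- ===== PORT A =====
-- A's while loop: i scans positions; every index read is in range when it is read, so getD is exact there
def pvALoop (cs : List Char) (i : Nat) : Bool :=
  if i + 1 < cs.length then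
    (if cs.getD i ' ' == ',' && cs.getD (i+1) ' ' == ',' &&
        (i == 0 || cs.getD (i-1) ' ' != '\\') then true
     else pvALoop cs (i+1))
  else false
termination_by cs.length - i

def has_double_unescaped_commas_py (dn_str : String) : Bool :=
  pvALoop dn_str.toList 0

-- ===== PORT B =====
def has_double_unescaped_commas_py_alt (dn_str : String) : Bool :=
  PySem.Str.isIn ",," (PySem.Str.replace dn_str "\\," "\x00")

-- ===== PRECONDITION & SPEC =====
def Spec_has_double_unescaped_commas_py (dn_str : String) (out : Bool) : Prop := out = has_double_unescaped_commas_py_alt dn_str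
instance (dn_str : String) (out : Bool) : Decidable (Spec_has_double_unescaped_commas_py dn_str out) := by unfold Spec_has_double_unescaped_commas_py; infer_instance

-- ===== CLAIM (what is proved, stated in full; the proofs are below) =====
def Claim_equal_has_double_unescaped_commas_py : Prop := ∀ (dn_str : String), Dom_has_double_unescaped_commas_py dn_str → Spec_has_double_unescaped_commas_py dn_str (has_double_unescaped_commas_py dn_str)

-- ===== LEMMAS AND PROOFS =====

def pvRep : List Char → List Char
  | [] => []
  | [c] => [c]
  | a :: b :: t => if a = '\\' ∧ b = ',' then '\x00' :: pvRep t else a :: pvRep (b :: t)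

def pvFB : Bool → List Char → Bool
  | _, [] => false
  | _, [_] => false
  | e, a :: b :: t => if a = ',' ∧ b = ',' ∧ e = false then true else pvFB (decide (a = '\\')) (b :: t)

def pvDD : List Char → Bool
  | [] => false
  | [_] => false
  | a :: b :: t => if a = ',' ∧ b = ',' then true else pvDD (b :: t)

theorem pvDD_cons (a : Char) (l : List Char) (h : a ≠ ',' ∨ l.head? ≠ some ',') :
    pvDD (a :: l) = pvDD l := by
  cases l with
  | nil => rfl
  | cons b t =>
    have hc : ¬ (a = ',' ∧ b = ',') := by
      rcases h with h | h
      · rintro ⟨h1, _⟩; exact h h1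
      · rintro ⟨_, h2⟩; exact h (by rw [h2]; rfl)
    rw [pvDD.eq_3, if_neg hc]

theorem pvRep_cons_head (b : Char) (u : List Char) (hb : b ≠ '\\') :
    ∃ l, pvRep (b :: u) = b :: l := by
  cases u with
  | nil => exact ⟨[], rfl⟩
  | cons c v =>
    have h : ¬ (b = '\\' ∧ c = ',') := by rintro ⟨h1, _⟩; exact hb h1
    exact ⟨pvRep (c :: v), by rw [pvRep.eq_3, if_neg h]⟩

theorem pvRep_head_ne_comma (b : Char) (u : List Char) (hb : b ≠ ',') :
    (pvRep (b :: u)).head? ≠ some ',' := by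
  by_cases hbs : b = '\\'
  · subst hbs
    cases u with
    | nil => decide
    | cons c v =>
      by_cases hc : c = ','
      · subst hc
        rw [pvRep.eq_3, if_pos ⟨rfl, rfl⟩]
        simp
      · have h : ¬ ('\\' = '\\' ∧ c = ',') := by rintro ⟨_, h2⟩; exact hc h2
        rw [pvRep.eq_3, if_neg h]
        simp
  · obtain ⟨l, hl⟩ := pvRep_cons_head b u hbs
    rw [hl]
    simpa using hb

theorem pvFB_true_comma (t : List Char) : pvFB true (',' :: t) = pvFB false t := by
  cases t with
  | nil => rfl
  | cons b u => simp [pvFB]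

theorem pvFB_true_of_head_ne (b : Char) (u : List Char) (hb : b ≠ ',') :
    pvFB true (b :: u) = pvFB false (b :: u) := by
  cases u with
  | nil => rfl
  | cons c v => simp [pvFB, hb]

theorem pvDD_rep (cs : List Char) : pvDD (pvRep cs) = pvFB false cs := by
  induction cs using pvRep.induct with
  | case1 => rfl
  | case2 c => rfl
  | case3 a b t hab ih =>
    obtain ⟨ha, hb⟩ := hab
    subst ha; subst hb
    rw [pvRep.eq_3, if_pos ⟨rfl, rfl⟩]
    rw [pvDD_cons _ _ (Or.inl (by decide)), ih]
    rw [show pvFB false ('\\' :: ',' :: t) = pvFB true (',' :: t) by simp [pvFB]]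
    rw [pvFB_true_comma]
  | case4 a b t hab ih =>
    rw [pvRep.eq_3, if_neg hab]
    by_cases hb : b = ','
    · subst hb
      by_cases ha : a = ','
      · subst ha
        obtain ⟨l, hl⟩ := pvRep_cons_head ',' t (by decide)
        rw [hl]
        simp [pvDD, pvFB]
      · rw [pvDD_cons _ _ (Or.inl ha), ih]
        have ha2 : a ≠ '\\' := by rintro rfl; exact hab ⟨rfl, rfl⟩
        simp [pvFB, ha, ha2]
    · rw [pvDD_cons _ _ (Or.inr (pvRep_head_ne_comma b t hb)), ih]
      by_cases ha : a = '\\'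
      · subst ha
        rw [show pvFB false ('\\' :: b :: t) = pvFB true (b :: t) by simp [pvFB, hb]]
        rw [pvFB_true_of_head_ne b t hb]
      · simp [pvFB, hb, ha]


theorem pvDD_iff_infix (l : List Char) : pvDD l = true ↔ [',', ','] <:+: l := by
  induction l with
  | nil =>
    constructor
    · intro h; cases h
    · intro h; exact absurd (h.length_le) (by simp)
  | cons a t ih =>
    cases t with
    | nil =>
      constructor
      · intro h; cases h
      · intro h; exact absurd (h.length_le) (by simp)
    | cons b u =>
      rw [pvDD.eq_3]
      by_cases hab : a = ',' ∧ b = ','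
      · rw [if_pos hab]
        obtain ⟨ha, hb⟩ := hab; subst ha; subst hb
        constructor
        · intro _
          exact (show [',', ','] <+: ',' :: ',' :: u from ⟨u, rfl⟩).isInfix
        · intro _; rfl
      · rw [if_neg hab, ih]
        have hnp : ¬ ([',', ','] <+: a :: b :: u) := by
          intro h
          rw [List.cons_prefix_cons] at h
          obtain ⟨h1, h2⟩ := h
          rw [List.cons_prefix_cons] at h2
          exact hab ⟨h1.symm, h2.1.symm⟩
        constructor
        · intro h
          exact List.infix_cons_iff.mpr (Or.inr h)
        · intro h
          rcases List.infix_cons_iff.mp h with h | h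
          · exact absurd h hnp
          · exact h

theorem go_eq (fuel : Nat) (l acc : List Char) (h : l.length ≤ fuel) :
    PySem.Chars.replace.go ['\\', ','] ['\x00'] fuel l acc = acc.reverse ++ pvRep l := by
  induction fuel generalizing l acc with
  | zero =>
    have : l = [] := List.length_eq_zero_iff.mp (Nat.le_zero.mp h)
    subst this
    simp [PySem.Chars.replace.go, pvRep]
  | succ fuel ih =>
    cases l with
    | nil => simp [PySem.Chars.replace.go, pvRep]
    | cons c t =>
      rw [PySem.Chars.replace.go]
      by_cases hpre : List.isPrefixOf ['\\', ','] (c :: t)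
      · rw [if_pos hpre]
        obtain ⟨s, hs⟩ := List.isPrefixOf_iff_prefix.mp hpre
        have hc : c = '\\' := by cases hs; rfl
        have ht : t = ',' :: s := by cases hs; rfl
        subst hc; subst ht
        rw [ih]
        · simp [pvRep]
        · simp at h ⊢; omega
      · rw [if_neg hpre]
        rw [ih]
        · have hrep : pvRep (c :: t) = c :: pvRep t := by
            cases t with
            | nil => rfl
            | cons b u =>
              have : ¬ (c = '\\' ∧ b = ',') := by
                rintro ⟨rfl, rfl⟩
                exact hpre (by simp [List.isPrefixOf])
              rw [pvRep.eq_3, if_neg this]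
          simp [hrep]
        · simp at h ⊢; omega

theorem pvGetD_mid (pre t : List Char) (b : Char) :
    (pre ++ b :: t).getD pre.length ' ' = b := by
  simp

theorem pvALoop_eq (t pre : List Char) :
    pvALoop (pre ++ t) pre.length = pvFB (pre.getLast? == some '\\') t := by
  induction t generalizing pre with
  | nil =>
    rw [pvALoop]
    simp [pvFB]
  | cons b u ih =>
    cases u with
    | nil =>
      rw [pvALoop]
      simp [pvFB]
    | cons c v =>
      rw [pvALoop]
      have hlen : pre.length + 1 < (pre ++ b :: c :: v).length := by simp
      rw [if_pos hlen]
      have g1 : (pre ++ b :: c :: v).getD pre.length ' ' = b := pvGetD_mid pre _ b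
      have g2 : (pre ++ b :: c :: v).getD (pre.length + 1) ' ' = c := by
        have : pre ++ b :: c :: v = (pre ++ [b]) ++ c :: v := by simp
        rw [this, show pre.length + 1 = (pre ++ [b]).length by simp]
        exact pvGetD_mid (pre ++ [b]) _ c
      have hrec : pvALoop (pre ++ b :: c :: v) (pre.length + 1)
          = pvFB (decide (b = '\\')) (c :: v) := by
        have h1 : pre ++ b :: c :: v = (pre ++ [b]) ++ c :: v := by simp
        have h2 : pre.length + 1 = (pre ++ [b]).length := by simp
        rw [h1, h2, ih]
        by_cases hbb : b = '\\'
        · simp [hbb]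
        · rw [show ((pre ++ [b]).getLast? == some '\\') = false by
                simp [beq_eq_false_iff_ne, hbb],
              show decide (b = '\\') = false by simp [hbb]]
      rcases List.eq_nil_or_concat pre with hpre | ⟨q, z, hpre⟩
      · subst hpre
        simp only [List.nil_append, List.length_nil] at g1 g2 hrec ⊢
        rw [g1, g2]
        by_cases hb : b = ',' <;> by_cases hc : c = ','
        all_goals simp [pvFB, hb, hc] at hrec ⊢
        all_goals exact hrec
      · rw [List.concat_eq_append] at hpre
        subst hpre
        have g3 : (q ++ [z] ++ b :: c :: v).getD ((q ++ [z]).length - 1) ' ' = z := by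
          have : (q ++ [z]).length - 1 = q.length := by simp
          rw [this, show q ++ [z] ++ b :: c :: v = q ++ z :: (b :: c :: v) by simp]
          exact pvGetD_mid q _ z
        rw [g1, g2, g3]
        have hne : ((q ++ [z]).length == 0) = false := by simp
        have hlast : (q ++ [z]).getLast? = some z := by simp
        rw [hne, hlast]
        have hrec' : pvALoop (q ++ z :: b :: c :: v) (q.length + 1 + 1)
            = pvFB (decide (b = '\\')) (c :: v) := by simpa using hrec
        by_cases hb : b = ',' <;> by_cases hc : c = ',' <;> by_cases hz : z = '\\'
        all_goals simp [pvFB, hb, hc, hz] at hrec' ⊢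
        all_goals exact hrec'

theorem pv_main (dn_str : String) :
    has_double_unescaped_commas_py dn_str = has_double_unescaped_commas_py_alt dn_str := by
  unfold has_double_unescaped_commas_py has_double_unescaped_commas_py_alt
  have hA : pvALoop dn_str.toList 0 = pvFB false dn_str.toList := by
    have := pvALoop_eq dn_str.toList []
    simpa using this
  have hrep : PySem.Str.replace dn_str "\\," "\x00"
      = String.ofList (pvRep dn_str.toList) := by
    unfold PySem.Str.replace
    have h1 : ("\\,".toList) = ['\\', ','] := by decide
    have h2 : ("\x00".toList) = ['\x00'] := by decide
    rw [h1, h2]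
    unfold PySem.Chars.replace
    rw [if_neg (by simp)]
    rw [go_eq _ _ _ (le_refl _)]
    simp
  rw [hA, hrep]
  have hB : PySem.Str.isIn ",," (String.ofList (pvRep dn_str.toList))
      = pvDD (pvRep dn_str.toList) := by
    rw [Bool.eq_iff_iff]
    rw [PySem.Str.isIn_iff_infix]
    have h3 : (",,".toList) = [',', ','] := by decide
    rw [h3]
    rw [show (String.ofList (pvRep dn_str.toList)).toList = pvRep dn_str.toList by simp]
    exact (pvDD_iff_infix _).symm
  rw [hB, pvDD_rep]

-- ===== VERDICT (by name: the statement is the Claim_ definition above) =====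
theorem has_double_unescaped_commas_py_spec : Claim_equal_has_double_unescaped_commas_py := by
  intro dn_str _
  unfold Spec_has_double_unescaped_commas_py
  exact pv_main dn_str
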